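-- pv_equiv track=rewrite | github.com/InfiniteWing/Solves | zerojudge.tw/c089.py | Base10toBaseN
-- ===== SOURCE A (Python) =====
-- def Base10toBaseN(base,n):
-- 	mod=['0','1','2','3','4','5','6','7','8','9','A','B','C','D','E','F']
-- 	ans=""
-- 	num=int(n)
-- 	base=int(base)
-- 	while(num>0):
-- 		ans+=mod[num%base]
-- 		num=int(num/base)
-- 	ans2=""
-- 	for i in range(len(ans)):
-- 		ans2+=ans[len(ans)-i-1]
-- 	return ans2
-- ===== SOURCE B (Python) =====
-- def Base10toBaseN(base, n):
--     mod = ['0', '1', '2', '3', '4', '5', '6', '7', '8', '9', 'A', 'B', 'C', 'D', 'E', 'F']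
--     base = int(base)
--
--     def go(q):
--         if q <= 0:
--             return ""
--         return go(int(q / base)) + mod[q % base]
--
--     return go(int(n))
-- ===== Notes on version B (the rewrite author's own statement) =====
-- stated objective: simpler
-- what changed: B builds the result recursively most-significant-digit-first (go(q) = go(int(q/base)) + digit), so A's digit-accumulation loop and its separate index-based reversal loop both disappear; Pre_ admits exactly the inputs where A returns, excluding only those where A raises ZeroDivisionError/IndexError or loops forever (base 0, base 1 with n>0, and bases beyond +-16 with a digit outside the 16-entry table).
import Mathlib
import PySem

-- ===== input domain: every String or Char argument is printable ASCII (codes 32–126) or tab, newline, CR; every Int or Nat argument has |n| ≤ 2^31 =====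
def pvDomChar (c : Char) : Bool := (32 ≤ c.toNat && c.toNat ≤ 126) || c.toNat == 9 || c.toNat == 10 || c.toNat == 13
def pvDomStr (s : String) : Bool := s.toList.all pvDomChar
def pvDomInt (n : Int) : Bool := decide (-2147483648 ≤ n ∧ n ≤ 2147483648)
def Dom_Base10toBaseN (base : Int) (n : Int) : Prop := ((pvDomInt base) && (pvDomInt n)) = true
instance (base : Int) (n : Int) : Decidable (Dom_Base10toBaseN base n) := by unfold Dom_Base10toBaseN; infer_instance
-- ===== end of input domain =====

-- B replaces A's digit-accumulation loop plus index-based reversal loop by one recursion that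
-- emits the most significant digit first; equivalence of the return values is proved on Pre_.

-- ===== PORT A =====
-- the 16-entry digit table; each Python entry is a one-character string, represented as its Char
def pvMod : List Char := ['0', '1', '2', '3', '4', '5', '6', '7', '8', '9', 'A', 'B', 'C', 'D', 'E', 'F']

-- the while loop; fuel makes the recursion total (inside Pre_ the fuel n.toNat+1 is never exhausted,
-- since each iteration strictly decreases a positive num or makes it ≤ 0).
-- int(num/base) is ported as Python floor division: for |num| ≤ 2^31 and the bases admitted by Pre_
-- the float division of A is exact enough that int(num/base) = num // base (and for negative base the
-- loop stops after the first iteration either way); mod[num%base] is pyGet? (negative-index wraparound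
-- kept), whose none (IndexError) case appends nothing — unreachable inside Pre_.
def pvLoopA (base : Int) : Nat → Int → List Char → List Char
  | 0, _, ans => ans
  | fuel + 1, num, ans =>
    if 0 < num then
      pvLoopA base fuel (PySem.Int.floordiv num base)
        (ans ++ (PySem.List.pyGet? pvMod (PySem.Int.mod num base)).toList)
    else ans

-- the reversal loop: for i in range(len(ans)): ans2 += ans[len(ans)-i-1]
def pvRevLoopA (ans : List Char) : List Char :=
  (PySem.List.pyRange 0 (ans.length : Int) 1).foldl
    (fun ans2 i => ans2 ++ (PySem.List.pyGet? ans ((ans.length : Int) - i - 1)).toList) []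

def Base10toBaseN (base : Int) (n : Int) : String :=
  String.mk (pvRevLoopA (pvLoopA base (n.toNat + 1) n []))

-- ===== PORT B =====
-- go(q): "" if q <= 0 else go(int(q/base)) + mod[q % base]; fuel as above, int(q/base) as floordiv
def pvGoB (base : Int) : Nat → Int → List Char
  | 0, _ => []
  | fuel + 1, q =>
    if q ≤ 0 then []
    else pvGoB base fuel (PySem.Int.floordiv q base) ++ (PySem.List.pyGet? pvMod (PySem.Int.mod q base)).toList

def Base10toBaseN_alt (base : Int) (n : Int) : String :=
  String.mk (pvGoB base (n.toNat + 1) n)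

-- ===== PRECONDITION & SPEC =====
-- Pre_ is exactly where A returns: it excludes only inputs with n > 0 on which A raises or diverges —
-- base 0 (ZeroDivisionError), base 1 (infinite loop), and bases beyond ±16 whose base-`base` digits
-- (resp., for base ≤ -17, n % base) leave the 16-entry table, raising IndexError.
def Pre_Base10toBaseN (base : Int) (n : Int) : Prop :=
  n ≤ 0 ∨ (2 ≤ base ∧ ∀ k : Nat, k < 32 → PySem.Int.mod (PySem.Int.floordiv n (base ^ k)) base ≤ 15)
    ∨ (-16 ≤ base ∧ base ≤ -1) ∨ (base ≤ -17 ∧ -16 ≤ PySem.Int.mod n base)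
instance (base : Int) (n : Int) : Decidable (Pre_Base10toBaseN base n) := by
  unfold Pre_Base10toBaseN; infer_instance

def pvWitness_Base10toBaseN : Int × Int := (16, 255)

def Spec_Base10toBaseN (base : Int) (n : Int) (out : String) : Prop := out = Base10toBaseN_alt base n
instance (base : Int) (n : Int) (out : String) : Decidable (Spec_Base10toBaseN base n out) := by
  unfold Spec_Base10toBaseN; infer_instance

-- ===== CLAIM (what is proved, stated in full; the proofs are below) =====
def Claim_equal_Base10toBaseN : Prop := ∀ (base : Int) (n : Int), Dom_Base10toBaseN base n → Pre_Base10toBaseN base n → Spec_Base10toBaseN base n (Base10toBaseN base n)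

-- ===== LEMMAS AND PROOFS =====

-- the accumulator of A's loop is a pure prefix
theorem pvLoopA_acc (base : Int) (fuel : Nat) :
    ∀ (num : Int) (ans : List Char), pvLoopA base fuel num ans = ans ++ pvLoopA base fuel num [] := by
  induction fuel with
  | zero => intro num ans; simp [pvLoopA]
  | succ f ih =>
    intro num ans
    simp only [pvLoopA]
    by_cases h : 0 < num
    · simp only [h, if_pos]
      rw [ih (PySem.Int.floordiv num base) (ans ++ _), ih (PySem.Int.floordiv num base) ([] ++ _)]
      simp
    · simp [h]

theorem reverse_optToList {α : Type} (o : Option α) : o.toList.reverse = o.toList := by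
  cases o <;> simp

-- reversing A's least-significant-first digit list gives B's recursion
theorem pvLoopA_reverse (base : Int) (fuel : Nat) :
    ∀ (num : Int), (pvLoopA base fuel num []).reverse = pvGoB base fuel num := by
  induction fuel with
  | zero => intro num; simp [pvLoopA, pvGoB]
  | succ f ih =>
    intro num
    simp only [pvLoopA, pvGoB]
    by_cases h : 0 < num
    · have h' : ¬ num ≤ 0 := by omega
      simp only [h, if_pos, h', if_neg, not_false_iff]
      rw [pvLoopA_acc base f (PySem.Int.floordiv num base)]
      simp [List.reverse_append, reverse_optToList, ih]
    · have h' : num ≤ 0 := by omega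
      simp [h, h']

-- A's index-based reversal loop computes List.reverse
theorem pvRevLoopA_aux (l : List Char) :
    ∀ (k : Nat) (acc : List Char), k ≤ l.length →
      (PySem.List.pyRange ((l.length : Int) - k) (l.length : Int) 1).foldl
        (fun ans2 i => ans2 ++ (PySem.List.pyGet? l ((l.length : Int) - i - 1)).toList) acc
      = acc ++ (l.take k).reverse := by
  intro k
  induction k with
  | zero =>
    intro acc _
    rw [PySem.List.pyRange_one_eq_nil (by omega)]
    simp
  | succ k ih =>
    intro acc hk
    rw [PySem.List.pyRange_one_cons (by omega)]
    simp only [List.foldl_cons]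
    have hidx : (l.length : Int) - ((l.length : Int) - (k + 1 : Nat)) - 1 = (k : Int) := by
      push_cast; ring
    rw [hidx]
    have hget : PySem.List.pyGet? l (k : Int) = some l[k] := by
      rw [PySem.List.pyGet?_natCast]
      exact List.getElem?_eq_getElem (by omega)
    have harg : (l.length : Int) - (k + 1 : Nat) + 1 = (l.length : Int) - (k : Nat) := by
      push_cast; ring
    rw [hget, harg]
    have htake : l.take (k + 1) = l.take k ++ [l[k]] := by
      rw [List.take_succ, List.getElem?_eq_getElem (by omega)]; rfl
    refine (ih (acc ++ (some l[k]).toList) (by omega)).trans ?_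
    rw [htake, List.reverse_append]
    simp

theorem pvRevLoopA_eq_reverse (l : List Char) : pvRevLoopA l = l.reverse := by
  unfold pvRevLoopA
  have h := pvRevLoopA_aux l l.length [] (le_refl _)
  simpa using h

-- ===== VERDICT (by name: the statement is the Claim_ definition above) =====
theorem Base10toBaseN_spec : Claim_equal_Base10toBaseN := by
  intro base n _ _
  show Base10toBaseN base n = Base10toBaseN_alt base n
  unfold Base10toBaseN Base10toBaseN_alt
  rw [pvRevLoopA_eq_reverse, pvLoopA_reverse]
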